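-- pv_equiv track=rewrite | github.com/chris-henry-holland/Portfolio | Python_projects/Project_Euler/Project_Euler_101_150.py | palindromicConsecutiveSquareSumStart
-- ===== SOURCE A (Python) =====
-- from typing import Dict, List, Tuple, Set, Union, Generator, Callable, Optional, Any, Hashable
--
-- def isPalindromic(num: int, base: int=10) -> bool:
--     """
--     For a given non-negative integer, assesses whether it is
--     palindromic when expressed in the chosen base (i.e. the
--     digits in the expression read the same forwards and
--     backwards).
--
--     Args:
--         Required positional:
--         num (int): The non-negative integer to be assessed
--                 for its status as palindromic when expressed
--                 in the chosen base.
--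
--         Optional named:
--         base (int): Integer strictly greater than 1 giving
--                 the base in which num is to be expressed
--                 when assessing whether or not it is
--                 palindromic.
--             Default: 10
--
--     Returns:
--     Boolean (bool) giving True if num is palindromic when
--     expressed in the chosen base and False otherwise.
--     """
--     digs = []
--     num2 = num
--     while num2:
--         num2, r = divmod(num2, base)
--         digs.append(r)
--     for i in range(len(digs) >> 1):
--         if digs[i] != digs[~i]: return False
--     return True
--
-- def palindromicConsecutiveSquareSumStart(start: int, mx: int, base: int=10) -> List[int]:
--     """
--     For a given integer start, finds all of the integers with
--     value no greater than mx that can be expressed as the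
--     sum of at least two consecutive integer squares, starting
--     with start^2, and are palindromic in the chosen base (i.e.
--     the digits in the expression read the same forwards and
--     backwards).
--
--     Args:
--         Required positional:
--         start (int): The integer whose square is the first
--                 in the consecutive integer square sums
--                 considered.
--         mx (int): The maximum allowed returned value.
--
--         Optional named:
--         base (int): Integer strictly greater than 1 giving the
--                 base in which integers are to be expressed
--                 when assessing whether or not they are
--                 palindromic.
--             Default: 10
--
--     Returns:
--     List of integers (ints) giving all the sums of at least 2
--     consecutive squares starting at start^2 that are
--     palindromic and no greater than mx, in strictly increasing
--     order.
--     """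
--     curr = start
--     tot = curr * curr
--     res = []
--     while True:
--         curr += 1
--         tot += curr * curr
--         if tot > mx: break
--         if isPalindromic(tot): res.append(tot)
--     return res
-- ===== SOURCE B (Python) =====
-- def palindromicConsecutiveSquareSumStart(start: int, mx: int, base: int=10):
--     # Closed-form prefix sums of squares instead of a running accumulator:
--     # S(n) = 1^2+...+n^2 (valid as a polynomial identity for all integers),
--     # so the sum start^2+...+c^2 equals S(c) - S(start-1).
--     def S(n):
--         return n * (n + 1) * (2 * n + 1) // 6
--     def is_pal(num):
--         digs = []
--         while num:
--             num, r = divmod(num, 10)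
--             digs.append(r)
--         return digs == digs[::-1]
--     off = S(start - 1)
--     k = start + 1
--     while S(k) - off <= mx:
--         k += 1
--     return [S(c) - off for c in range(start + 1, k) if is_pal(S(c) - off)]
-- ===== Notes on version B (the rewrite author's own statement) =====
-- stated objective: alternative
-- what changed: B replaces A's running-total while/break accumulator with the closed-form prefix sum of squares S(n)=n(n+1)(2n+1)//6: it first finds the crossing point k by a separate loop, then builds the result as a comprehension over range(start+1,k) computing each sum directly as S(c)-S(start-1), and tests palindromicity by comparing the digit list with its reversal instead of A's half-index loop.
import Mathlib
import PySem

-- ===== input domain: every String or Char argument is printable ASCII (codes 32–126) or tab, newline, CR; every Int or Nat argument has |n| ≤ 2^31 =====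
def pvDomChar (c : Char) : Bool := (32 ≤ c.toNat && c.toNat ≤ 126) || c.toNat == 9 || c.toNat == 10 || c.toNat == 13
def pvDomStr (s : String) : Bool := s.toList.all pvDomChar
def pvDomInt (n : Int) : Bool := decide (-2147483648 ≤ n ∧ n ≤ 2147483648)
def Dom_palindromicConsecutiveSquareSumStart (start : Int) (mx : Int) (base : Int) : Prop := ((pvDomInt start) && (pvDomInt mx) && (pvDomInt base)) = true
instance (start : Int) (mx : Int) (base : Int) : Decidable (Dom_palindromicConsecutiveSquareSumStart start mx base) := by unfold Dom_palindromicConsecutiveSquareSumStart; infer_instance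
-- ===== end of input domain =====

-- B replaces A's running-total while/break loop by the closed-form prefix sum of squares
-- S(n)=n(n+1)(2n+1)//6 (first finding the crossing point k, then a comprehension over the
-- range), and checks palindromicity by digs == digs[::-1]; objective: alternative.
-- Note: A's `base` parameter is unused by A (isPalindromic is called with its default 10);
-- both ports reproduce that.

-- ===== PORT A =====
-- digit-collection loop of isPalindromic: `while num2: num2, r = divmod(num2, base)` with
-- base = 10 (the default, the only way A calls it). Exact for num2 ≥ 0, the only values it
-- is reached with here (tot is a sum of squares ≥ 1); Python would not terminate for
-- num2 < 0, so the Lean guard is `0 < num2`.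
def pvDigits (num2 : Int) : List Int :=
  if h : 0 < num2 then
    PySem.Int.mod num2 10 :: pvDigits (PySem.Int.floordiv num2 10)
  else []
termination_by num2.toNat
decreasing_by
  have h10 : (0:Int) < 10 := by omega
  have hfd := PySem.Int.floordiv_eq_ediv_of_pos (a := num2) h10
  have heq := Int.mul_ediv_add_emod num2 10
  have hr0 : 0 ≤ num2 % 10 := Int.emod_nonneg num2 (by omega)
  have hr1 : num2 % 10 < 10 := Int.emod_lt_of_pos num2 h10
  omega

-- isPalindromic(tot) — half-index comparison digs[i] vs digs[~i]
def pyIsPalindromic (num : Int) : Bool :=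
  let digs := pvDigits num
  (PySem.List.pyRange 0 (digs.length >>> 1) 1).all
    (fun i => PySem.List.pyGet? digs i == PySem.List.pyGet? digs (-(i + 1)))

def pvLoopA (fuel : Nat) (mx : Int) (curr : Int) (tot : Int) (res : List Int) : List Int :=
  match fuel with
  | 0 => res
  | fuel + 1 =>
    let curr' := curr + 1
    let tot' := tot + curr' * curr'
    if tot' > mx then res
    else pvLoopA fuel mx curr' tot' (if pyIsPalindromic tot' then res ++ [tot'] else res)

def palindromicConsecutiveSquareSumStart (start : Int) (mx : Int) (base : Int) : List Int :=
  -- fuel (mx - start).toNat + 2 strictly exceeds the number of iterations of A's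
  -- `while True` loop (which breaks once tot, ≥ curr², exceeds mx)
  pvLoopA ((mx - start).toNat + 2) mx start (start * start) []

-- ===== PORT B =====
def pvS (n : Int) : Int := PySem.Int.floordiv (n * (n + 1) * (2 * n + 1)) 6

def pvIsPalAlt (num : Int) : Bool :=
  let digs := pvDigits num   -- same digit-collection while-loop as Source B's is_pal
  some digs == PySem.List.slice? digs none none (-1)   -- digs == digs[::-1]

def pvFindK (fuel : Nat) (mx : Int) (off : Int) (k : Int) : Int :=
  match fuel with
  | 0 => k
  | fuel + 1 => if pvS k - off ≤ mx then pvFindK fuel mx off (k + 1) else k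

def palindromicConsecutiveSquareSumStart_alt (start : Int) (mx : Int) (base : Int) : List Int :=
  let off := pvS (start - 1)
  let k := pvFindK ((mx - start).toNat + 2) mx off (start + 1)
  ((PySem.List.pyRange (start + 1) k 1).filter (fun c => pvIsPalAlt (pvS c - off))).map
    (fun c => pvS c - off)

-- ===== PRECONDITION & SPEC =====
def Spec_palindromicConsecutiveSquareSumStart (start : Int) (mx : Int) (base : Int) (out : List Int) : Prop := out = palindromicConsecutiveSquareSumStart_alt start mx base
instance (start : Int) (mx : Int) (base : Int) (out : List Int) : Decidable (Spec_palindromicConsecutiveSquareSumStart start mx base out) := by unfold Spec_palindromicConsecutiveSquareSumStart; infer_instance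

-- ===== CLAIM (what is proved, stated in full; the proofs are below) =====
def Claim_equal_palindromicConsecutiveSquareSumStart : Prop := ∀ (start : Int) (mx : Int) (base : Int), Dom_palindromicConsecutiveSquareSumStart start mx base → Spec_palindromicConsecutiveSquareSumStart start mx base (palindromicConsecutiveSquareSumStart start mx base)

-- ===== LEMMAS AND PROOFS =====

theorem pvS_mul_six (n : Int) : 6 * pvS n = n * (n + 1) * (2 * n + 1) := by
  have h3 : (3:Int) ∣ n * (n + 1) * (2 * n + 1) := by
    obtain ⟨q, r, hr0, hr2, hn⟩ : ∃ q r : Int, 0 ≤ r ∧ r < 3 ∧ n = 3 * q + r :=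
      ⟨n / 3, n % 3, Int.emod_nonneg n (by omega), Int.emod_lt_of_pos n (by omega), by omega⟩
    have : r = 0 ∨ r = 1 ∨ r = 2 := by omega
    rcases this with h | h | h <;> subst h <;> subst hn
    · exact ⟨q * (3 * q + 1) * (6 * q + 1), by ring⟩
    · exact ⟨(3 * q + 1) * (3 * q + 2) * (2 * q + 1), by ring⟩
    · exact ⟨(3 * q + 2) * (q + 1) * (6 * q + 5), by ring⟩
  have h2 : (2:Int) ∣ n * (n + 1) * (2 * n + 1) :=
    dvd_mul_of_dvd_left (Int.even_mul_succ_self n).two_dvd _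
  obtain ⟨m, hm⟩ : (6:Int) ∣ n * (n + 1) * (2 * n + 1) := by omega
  unfold pvS
  rw [PySem.Int.floordiv_eq_ediv_of_pos (by omega), hm, Int.mul_ediv_cancel_left m (by omega)]

theorem pvS_succ (n : Int) : pvS (n + 1) = pvS n + (n + 1) * (n + 1) := by
  have h1 := pvS_mul_six n
  have h2 := pvS_mul_six (n + 1)
  nlinarith [h1, h2]

theorem pvFindK_ge (fuel : Nat) (mx off k : Int) : k ≤ pvFindK fuel mx off k := by
  induction fuel generalizing k with
  | zero => simp [pvFindK]
  | succ f ih =>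
    simp only [pvFindK]
    split
    · exact le_trans (by omega) (ih (k + 1))
    · omega

theorem half_iff (l : List Int) :
    ((PySem.List.pyRange 0 (l.length >>> 1) 1).all
      (fun i => PySem.List.pyGet? l i == PySem.List.pyGet? l (-(i + 1))) = true) ↔
    l = l.reverse := by
  rw [List.all_eq_true]
  constructor
  · intro h
    have hh : ∀ j : Nat, j < l.length / 2 → l[j]? = l[l.length - 1 - j]? := by
      intro j hj
      have hmem : (j : Int) ∈ PySem.List.pyRange 0 (l.length >>> 1) 1 := by
        rw [PySem.List.mem_pyRange_one]
        constructor
        · omega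
        · have : l.length >>> 1 = l.length / 2 := Nat.shiftRight_one _
          omega
      have := h _ hmem
      rw [beq_iff_eq] at this
      have hneg : (-((j : Int) + 1)) = -(((j + 1 : Nat) : Int)) := by push_cast; ring
      rw [PySem.List.pyGet?_natCast, hneg,
        PySem.List.pyGet?_neg_natCast l (j + 1) (by omega) (by omega)] at this
      rw [this]
      congr 1
      omega
    apply List.ext_getElem (by simp)
    intro j h1 h2
    rw [List.getElem_reverse]
    by_cases hj : j < l.length / 2
    · have := hh j hj
      rw [List.getElem?_eq_getElem h1, List.getElem?_eq_getElem (by omega)] at this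
      exact Option.some_injective _ this
    · by_cases hmid : l.length - 1 - j = j
      · have e : l[l.length - 1 - j]? = l[j]? := by rw [hmid]
        rw [List.getElem?_eq_getElem (by omega), List.getElem?_eq_getElem (by omega)] at e
        exact (Option.some_injective _ e).symm
      · have hj2 : l.length - 1 - j < l.length / 2 := by omega
        have this2 := hh _ hj2
        have harg : l.length - 1 - (l.length - 1 - j) = j := by omega
        rw [harg] at this2
        rw [List.getElem?_eq_getElem (by omega), List.getElem?_eq_getElem (by omega)] at this2
        exact (Option.some_injective _ this2).symm
  · intro h i hi
    rw [PySem.List.mem_pyRange_one] at hi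
    obtain ⟨hi0, hi1⟩ := hi
    rw [beq_iff_eq]
    obtain ⟨j, rfl⟩ : ∃ j : Nat, i = (j : Int) := ⟨i.toNat, by omega⟩
    have hshift : l.length >>> 1 = l.length / 2 := Nat.shiftRight_one _
    have hj : j < l.length / 2 := by omega
    have hneg : (-((j : Int) + 1)) = -(((j + 1 : Nat) : Int)) := by push_cast; ring
    rw [PySem.List.pyGet?_natCast, hneg, PySem.List.pyGet?_neg_natCast l (j + 1) (by omega) (by omega)]
    have hb1 : j < l.length := by omega
    have hb2 : l.length - 1 - j < l.length := by omega
    have hb3 : j < l.reverse.length := by simp; omega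
    have e1 : l[j] = l.reverse[j]'hb3 := List.getElem_of_eq h hb1
    have e2 : l.reverse[j]'hb3 = l[l.length - 1 - j] := by rw [List.getElem_reverse]
    have hidx : l.length - (j + 1) = l.length - 1 - j := by omega
    rw [hidx, List.getElem?_eq_getElem hb1, List.getElem?_eq_getElem hb2, e1, e2]

theorem pal_eq (num : Int) : pyIsPalindromic num = pvIsPalAlt num := by
  simp only [pyIsPalindromic, pvIsPalAlt, PySem.List.slice?_none_none_neg_one]
  rw [Bool.eq_iff_iff, half_iff]
  simp

theorem core (fuel : Nat) (start mx : Int) (curr : Int) (res : List Int) :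
    pvLoopA fuel mx curr (pvS curr - pvS (start - 1)) res =
      res ++ ((PySem.List.pyRange (curr + 1) (pvFindK fuel mx (pvS (start - 1)) (curr + 1)) 1).filter
        (fun c => pvIsPalAlt (pvS c - pvS (start - 1)))).map (fun c => pvS c - pvS (start - 1)) := by
  induction fuel generalizing curr res with
  | zero =>
    simp [pvLoopA, pvFindK, PySem.List.pyRange_one_eq_nil (le_refl (curr + 1))]
  | succ f ih =>
    have hstep : pvS curr - pvS (start - 1) + (curr + 1) * (curr + 1)
        = pvS (curr + 1) - pvS (start - 1) := by
      have := pvS_succ curr; omega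
    simp only [pvLoopA, pvFindK]
    by_cases hgt : pvS (curr + 1) - pvS (start - 1) > mx
    · have hA : pvS curr - pvS (start - 1) + (curr + 1) * (curr + 1) > mx := by omega
      have hB : ¬ (pvS (curr + 1) - pvS (start - 1) ≤ mx) := by omega
      rw [if_pos hA, if_neg hB, PySem.List.pyRange_one_eq_nil (le_refl (curr + 1))]
      simp
    · have hA : ¬ (pvS curr - pvS (start - 1) + (curr + 1) * (curr + 1) > mx) := by omega
      have hB : pvS (curr + 1) - pvS (start - 1) ≤ mx := by omega
      rw [if_neg hA, if_pos hB]
      have hk : curr + 1 + 1 ≤ pvFindK f mx (pvS (start - 1)) (curr + 1 + 1) :=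
        pvFindK_ge f mx (pvS (start - 1)) (curr + 1 + 1)
      rw [hstep, ih (curr + 1)]
      rw [PySem.List.pyRange_one_cons (by omega : curr + 1 < pvFindK f mx (pvS (start - 1)) (curr + 1 + 1))]
      rw [pal_eq]
      by_cases hp : pvIsPalAlt (pvS (curr + 1) - pvS (start - 1))
      · simp [hp, List.append_assoc]
      · simp [hp]

theorem start_sq (start : Int) : start * start = pvS start - pvS (start - 1) := by
  have := pvS_succ (start - 1)
  have h : start - 1 + 1 = start := by ring
  rw [h] at this
  nlinarith [this]

-- ===== VERDICT (by name: the statement is the Claim_ definition above) =====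
theorem palindromicConsecutiveSquareSumStart_spec : Claim_equal_palindromicConsecutiveSquareSumStart := by
  intro start mx base _
  unfold Spec_palindromicConsecutiveSquareSumStart
  unfold palindromicConsecutiveSquareSumStart palindromicConsecutiveSquareSumStart_alt
  rw [start_sq, core ((mx - start).toNat + 2) start mx start []]
  simp
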